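-- pv_equiv track=rewrite | github.com/naoanao/sage-official-site | backend/pipelines/course_production_pipeline.py | _scrub_ip_risks
-- ===== SOURCE A (Python) =====
-- def _scrub_ip_risks(topic: str) -> str:
--     """Replace copyrighted IP names with generic equivalents for commercial safety"""
--     replacements = {
--         "one piece": "Shonen Adventure Epic",
--         "naruto": "Ninja Battle Legend",
--         "dragon ball": "Cosmic Martial Arts Saga",
--         "pokemon": "Monster Training Journey",
--         "mickey mouse": "Classic Animated Mascot",
--         "disney": "Major Animation Studio"
--     }
--     scrubbed = topic
--     for key, val in replacements.items():
--         if key in scrubbed.lower():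
--             # We keep a hint of the original but make it generic
--             scrubbed = scrubbed.lower().replace(key, f"{val} style")
--     return scrubbed.title()
-- ===== SOURCE B (Python) =====
-- def _scrub_ip_risks(topic: str) -> str:
--     """Replace copyrighted IP names with generic equivalents for commercial safety"""
--     replacements = {
--         "one piece": "Shonen Adventure Epic",
--         "naruto": "Ninja Battle Legend",
--         "dragon ball": "Cosmic Martial Arts Saga",
--         "pokemon": "Monster Training Journey",
--         "mickey mouse": "Classic Animated Mascot",
--         "disney": "Major Animation Studio"
--     }
--     s = topic.lower()
--     out = []
--     i = 0
--     n = len(s)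
--     while i < n:
--         for key, val in replacements.items():
--             if s.startswith(key, i):
--                 out.append(f"{val} style")
--                 i += len(key)
--                 break
--         else:
--             out.append(s[i])
--             i += 1
--     return "".join(out).title()
-- ===== Notes on version B (the rewrite author's own statement) =====
-- stated objective: alternative
-- what changed: A makes six sequential full-string lower+replace passes, one per IP name; B lowercases once and does a single left-to-right scan that at each position matches any of the six names (first match in table order) and substitutes it from the table, building the output in one pass.
import Mathlib
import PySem

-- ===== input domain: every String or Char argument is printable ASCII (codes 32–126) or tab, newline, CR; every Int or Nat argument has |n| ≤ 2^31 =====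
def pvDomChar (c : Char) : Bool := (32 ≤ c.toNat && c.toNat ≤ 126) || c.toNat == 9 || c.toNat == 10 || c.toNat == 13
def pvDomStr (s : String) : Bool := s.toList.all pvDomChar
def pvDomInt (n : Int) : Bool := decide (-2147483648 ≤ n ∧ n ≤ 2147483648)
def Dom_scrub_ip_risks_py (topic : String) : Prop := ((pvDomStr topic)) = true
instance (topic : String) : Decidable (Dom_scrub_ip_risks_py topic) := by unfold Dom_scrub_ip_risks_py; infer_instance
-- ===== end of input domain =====

-- B replaces A's six sequential full-string lower+replace passes by a single left-to-right
-- scan that matches any of the six names at each position and substitutes from the table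
-- (objective: alternative single-pass algorithm, same asymptotic cost).

-- ===== PORT A =====
-- the dict literal of A, in insertion order
def pvItems : List (String × String) :=
  [("one piece","Shonen Adventure Epic"), ("naruto","Ninja Battle Legend"),
   ("dragon ball","Cosmic Martial Arts Saga"), ("pokemon","Monster Training Journey"),
   ("mickey mouse","Classic Animated Mascot"), ("disney","Major Animation Studio")]

-- hand port of Python str.title() (PySem has no title): a char is uppercased when the
-- previous char is not a letter, lowercased otherwise; exact on the ASCII domain Dom admits
def pvTitleGo : Bool → List Char → List Char
  | _, [] => []
  | prev, c :: t =>
    if PySem.Chars.isalpha c = true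
    then (if prev then PySem.Chars.lowerChar c else PySem.Chars.upperChar c) :: pvTitleGo true t
    else c :: pvTitleGo false t

def scrub_ip_risks_py (topic : String) : String :=
  let scrubbed := pvItems.foldl (fun scrubbed kv =>
    if PySem.Str.isIn kv.1 (PySem.Str.lower scrubbed) = true then
      PySem.Str.replace (PySem.Str.lower scrubbed) kv.1 (kv.2 ++ " style")
    else scrubbed) topic
  String.ofList (pvTitleGo false scrubbed.toList)

-- ===== PORT B =====
-- port of Source B's while-loop: the index i becomes the remaining suffix (drop), the
-- `for key,val … if s.startswith(key,i)` becomes find? over the same items in order,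
-- the out-buffer plus "".join becomes list append; step for step
def pvBGo (s : List Char) : List Char :=
  match s with
  | [] => []
  | c :: t =>
    match h : pvItems.find? (fun kv => kv.1.toList.isPrefixOf (c :: t)) with
    | some kv => (kv.2 ++ " style").toList ++ pvBGo ((c :: t).drop kv.1.toList.length)
    | none => c :: pvBGo t
  termination_by s.length
  decreasing_by
  · have hm := List.mem_of_find?_eq_some h
    have hp := List.find?_some h
    simp only [pvItems, List.mem_cons, List.mem_singleton] at hm
    rcases hm with rfl|rfl|rfl|rfl|rfl|rfl|hm <;> simp_all <;> omega
  · simp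

def scrub_ip_risks_py_alt (topic : String) : String :=
  String.ofList (pvTitleGo false (pvBGo (PySem.Str.lower topic).toList))

-- ===== PRECONDITION & SPEC =====
-- Pre_ excludes topics whose lowercase form contains two overlapping IP-name occurrences
-- (exactly the substrings "narutone piece", "pokemone piece", "pokemonaruto"): there A's
-- fixed pass order picks one of the two overlapping names by accident, B picks the leftmost,
-- and either choice is defensible for this unspecified corner.
def Pre_scrub_ip_risks_py (topic : String) : Prop :=
  PySem.Str.isIn "narutone piece" (PySem.Str.lower topic) = false ∧
  PySem.Str.isIn "pokemone piece" (PySem.Str.lower topic) = false ∧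
  PySem.Str.isIn "pokemonaruto" (PySem.Str.lower topic) = false
instance (topic : String) : Decidable (Pre_scrub_ip_risks_py topic) := by
  unfold Pre_scrub_ip_risks_py; infer_instance
def pvWitness_scrub_ip_risks_py : String := "Dragon Ball & Naruto, not Disney."

def Spec_scrub_ip_risks_py (topic : String) (out : String) : Prop := out = scrub_ip_risks_py_alt topic
instance (topic : String) (out : String) : Decidable (Spec_scrub_ip_risks_py topic out) := by
  unfold Spec_scrub_ip_risks_py; infer_instance

-- ===== CLAIM (what is proved, stated in full; the proofs are below) =====
def Claim_equal_scrub_ip_risks_py : Prop := ∀ (topic : String), Dom_scrub_ip_risks_py topic → Pre_scrub_ip_risks_py topic → Spec_scrub_ip_risks_py topic (scrub_ip_risks_py topic)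

-- ===== LEMMAS AND PROOFS =====

-- --- abbreviations for the six keys / replacement strings (lowercase) ---
def pvK (i : Nat) : List Char := ((pvItems.getD i ("","")).1).toList
def pvWm (i : Nat) : List Char := ((pvItems.getD i ("","")).2 ++ " style").toList
def pvW (i : Nat) : List Char := List.map PySem.Chars.lowerChar (pvWm i)
def pvBadL : List (List Char) := ["narutone piece".toList, "pokemone piece".toList, "pokemonaruto".toList]
def pvNoBad (s : List Char) : Prop := ∀ b ∈ pvBadL, ¬ b <:+: s

-- --- finite facts about the literal keys/values, by decide ---
theorem F_keys_ne : ∀ i ∈ List.range 6, pvK i ≠ [] := by decide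
theorem F_k_lower : ∀ i ∈ List.range 6, List.map PySem.Chars.lowerChar (pvK i) = pvK i := by decide
theorem F_no_pref : ∀ i ∈ List.range 6, ∀ j ∈ List.range 6, i ≠ j → (pvK i).isPrefixOf (pvK j) = false := by decide
set_option maxHeartbeats 1000000 in
theorem F_no_inf : ∀ i ∈ List.range 6, ∀ j ∈ List.range 6, i ≠ j → ∀ m ∈ List.range 13,
    (pvK i).isPrefixOf ((pvK j).drop m) = false := by decide
set_option maxHeartbeats 1000000 in
theorem F_bar : ∀ i ∈ List.range 6, ∀ j ∈ List.range 6, ∀ m ∈ List.range 30, m < (pvW i).length →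
    (pvK j).isPrefixOf ((pvW i).drop m) = false ∧ ((pvW i).drop m).isPrefixOf (pvK j) = false := by decide
set_option maxHeartbeats 4000000 in
theorem F_hard : ∀ p ∈ List.range 6, ∀ j ∈ List.range 6, p ≠ j → ∀ m ∈ List.range 13, 0 < m → m < (pvK j).length →
    ((pvK j).drop m).isPrefixOf (pvK p) = true →
    ((pvK p).drop ((pvK j).length - m) ≠ [] ∧
     pvBadL.contains (pvK j ++ (pvK p).drop ((pvK j).length - m)) = true ∧
     (∀ a ∈ List.range 13, ∀ i ∈ List.range 6, ((pvK p).drop ((pvK j).length - m)).drop a ≠ [] →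
        (((pvK p).drop ((pvK j).length - m)).drop a).isPrefixOf (pvW i) = false)) := by decide
set_option maxHeartbeats 1000000 in
theorem F_cross : ∀ p ∈ List.range 6, ∀ i ∈ List.range 6, i < p → ∀ a ∈ List.range 13, 0 < a → a < (pvK p).length →
    ((pvK p).drop a).isPrefixOf (pvW i) = true → pvBadL.contains ((pvK p).take a ++ pvK i) = true := by decide
theorem F_wlen : ∀ i ∈ List.range 6, 22 ≤ (pvW i).length := by decide
theorem F_wlen_up : ∀ i ∈ List.range 6, (pvW i).length ≤ 30 := by decide
theorem F_klen : ∀ i ∈ List.range 6, (pvK i).length ≤ 12 := by decide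

-- --- char-level lemmas ---
theorem pv_toNat_ofNat (n : Nat) (h : n < 55296) : (Char.ofNat n).toNat = n := by
  have hv : n.isValidChar := Or.inl h
  simp only [Char.ofNat, hv, dite_true, Char.ofNatAux]
  rfl
theorem pv_char_toNat_inj (a b : Char) (h : a.toNat = b.toNat) : a = b := by
  apply Char.ext
  exact UInt32.toNat_inj.mp h
theorem pv_isupper_iff (c : Char) : PySem.Chars.isupper c = true ↔ 65 ≤ c.toNat ∧ c.toNat ≤ 90 := by
  simp [PySem.Chars.isupper, Char.le_def]; rfl
theorem pv_islower_iff (c : Char) : PySem.Chars.islower c = true ↔ 97 ≤ c.toNat ∧ c.toNat ≤ 122 := by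
  simp [PySem.Chars.islower, Char.le_def]; rfl
theorem pv_lowerChar_idem (c : Char) :
    PySem.Chars.lowerChar (PySem.Chars.lowerChar c) = PySem.Chars.lowerChar c := by
  simp only [PySem.Chars.lowerChar]
  split_ifs with h1 h2 <;> try rfl
  exfalso
  rw [pv_isupper_iff] at h1 h2
  rw [pv_toNat_ofNat _ (by omega)] at h2
  omega
theorem pv_map_lower_idem (s : List Char) :
    List.map PySem.Chars.lowerChar (List.map PySem.Chars.lowerChar s) = List.map PySem.Chars.lowerChar s := by
  rw [List.map_map]; exact List.map_congr_left (fun c _ => pv_lowerChar_idem c)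
theorem pv_isalpha_lower (c : Char) : PySem.Chars.isalpha (PySem.Chars.lowerChar c) = PySem.Chars.isalpha c := by
  simp only [PySem.Chars.isalpha, PySem.Chars.lowerChar]
  split_ifs with h1
  · rw [pv_isupper_iff] at h1
    have ht : (Char.ofNat (c.toNat + 32)).toNat = c.toNat + 32 := pv_toNat_ofNat _ (by omega)
    have hu : PySem.Chars.isupper (Char.ofNat (c.toNat + 32)) = false := by
      rw [Bool.eq_false_iff]; intro hc; rw [pv_isupper_iff, ht] at hc; omega
    have hl : PySem.Chars.islower (Char.ofNat (c.toNat + 32)) = true := by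
      rw [pv_islower_iff, ht]; omega
    have hu2 : PySem.Chars.isupper c = true := by rw [pv_isupper_iff]; omega
    simp [hu, hl, hu2]
  · rfl
theorem pv_upper_lower (c : Char) : PySem.Chars.upperChar (PySem.Chars.lowerChar c) = PySem.Chars.upperChar c := by
  simp only [PySem.Chars.lowerChar]
  split_ifs with h1
  · rw [pv_isupper_iff] at h1
    have ht : (Char.ofNat (c.toNat + 32)).toNat = c.toNat + 32 := pv_toNat_ofNat _ (by omega)
    have hlo : PySem.Chars.islower (Char.ofNat (c.toNat + 32)) = true := by
      rw [pv_islower_iff, ht]; omega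
    have hlc : PySem.Chars.islower c = false := by
      rw [Bool.eq_false_iff]; intro hc; rw [pv_islower_iff] at hc; omega
    simp only [PySem.Chars.upperChar, hlo, hlc, if_true, if_false, Bool.false_eq_true]
    apply pv_char_toNat_inj
    rw [pv_toNat_ofNat _ (by rw [ht]; omega), ht]
    omega
  · rfl
theorem pv_lower_nonalpha (c : Char) (h : PySem.Chars.isalpha c = false) : PySem.Chars.lowerChar c = c := by
  simp only [PySem.Chars.isalpha, Bool.or_eq_false_iff] at h
  simp [PySem.Chars.lowerChar, h.1]

-- --- title ignores case of its input ---
theorem pvTitleGo_lower (s : List Char) : ∀ b,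
    pvTitleGo b (List.map PySem.Chars.lowerChar s) = pvTitleGo b s := by
  induction s with
  | nil => intro b; rfl
  | cons c t ih =>
    intro b
    simp only [List.map_cons, pvTitleGo, pv_isalpha_lower]
    by_cases h : PySem.Chars.isalpha c = true
    · simp only [h, if_true]
      cases b
      · simp [pv_upper_lower, ih]
      · simp [pv_lowerChar_idem, ih]
    · simp only [h]
      rw [pv_lower_nonalpha c (by simpa using h)]
      simp [ih]

-- --- a clean structural model of Chars.replace ---
def pvRep (old new : List Char) (s : List Char) : List Char :=
  if ho : old.isEmpty then s
  else if hp : old.isPrefixOf s then new ++ pvRep old new (s.drop old.length)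
  else match s with
  | [] => []
  | c :: t => c :: pvRep old new t
  termination_by s.length
  decreasing_by
  · simp only [List.isPrefixOf_iff_prefix] at hp
    have h1 : old.length ≤ s.length := hp.length_le
    have h2 : 0 < old.length := by
      cases old with
      | nil => simp at ho
      | cons a b => simp
    simp only [List.length_drop]; omega
  · simp

theorem pvRep_nil (old new : List Char) : pvRep old new [] = [] := by
  rw [pvRep]
  cases old with
  | nil => simp
  | cons a b => simp

theorem pvRep_consume (old new r : List Char) (h : old ≠ []) :
    pvRep old new (old ++ r) = new ++ pvRep old new r := by
  rw [pvRep]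
  have h1 : old.isEmpty = false := by cases old <;> simp_all
  have h2 : old.isPrefixOf (old ++ r) = true := by
    simp [List.isPrefixOf_iff_prefix]
  simp [h1, h2]

theorem pvRep_cons_neg (old new : List Char) (c : Char) (t : List Char)
    (h : ¬ old <+: (c :: t)) : pvRep old new (c :: t) = c :: pvRep old new t := by
  rw [pvRep]
  have h1 : old.isEmpty = false := by
    cases old with
    | nil => exact absurd (List.nil_prefix) h
    | cons a b => rfl
  have h2 : old.isPrefixOf (c :: t) = false := by
    rw [Bool.eq_false_iff]; intro hc; rw [List.isPrefixOf_iff_prefix] at hc; exact h hc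
  simp [h1, h2]

theorem pv_go_eq (old new : List Char) (ho : old ≠ []) :
    ∀ fuel s acc, s.length ≤ fuel →
    PySem.Chars.replace.go old new fuel s acc = acc.reverse ++ pvRep old new s := by
  intro fuel
  induction fuel with
  | zero =>
    intro s acc h
    have : s = [] := by cases s <;> simp_all
    subst this
    rw [PySem.Chars.replace.go]
    rw [pvRep]
    cases old <;> simp_all
  | succ n ih =>
    intro s acc h
    cases s with
    | nil =>
      have h0 : pvRep old new [] = [] := by rw [pvRep]; cases old <;> simp_all
      simp [PySem.Chars.replace.go, h0]
    | cons c t =>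
      rw [PySem.Chars.replace.go]
      have hol : 0 < old.length := by cases old <;> simp_all
      have hie : old.isEmpty = false := by cases old <;> simp_all
      by_cases hp : old.isPrefixOf (c :: t)
      · simp only [hp, if_true]
        rw [ih (List.drop old.length (c :: t)) (new.reverse ++ acc)
            (by simp only [List.length_drop, List.length_cons] at *; omega)]
        conv_rhs => rw [pvRep]
        simp [hie, hp]
      · simp only [hp, if_false]
        rw [ih t (c :: acc) (by simp only [List.length_cons] at h; omega)]
        conv_rhs => rw [pvRep]
        simp [hie, hp]

theorem pv_replace_eq_pvRep (old new s : List Char) (h : old ≠ []) :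
    PySem.Chars.replace s old new = pvRep old new s := by
  have hie : old.isEmpty = false := by cases old <;> simp_all
  rw [PySem.Chars.replace, hie]
  simpa using pv_go_eq old new h s.length s [] le_rfl

-- prefix of an append splits
theorem pv_prefix_append_cases {v a b : List Char} : v <+: a ++ b →
    v <+: a ∨ ∃ v2, v = a ++ v2 ∧ v2 <+: b := by
  induction a generalizing v with
  | nil => intro h; right; exact ⟨v, rfl, h⟩
  | cons x xs ih =>
    intro h
    cases v with
    | nil => left; exact List.nil_prefix
    | cons y ys =>
      rw [List.cons_append, List.cons_prefix_cons] at h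
      obtain ⟨rfl, h2⟩ := h
      rcases ih h2 with h3 | ⟨v2, rfl, hv2⟩
      · left; exact List.cons_prefix_cons.mpr ⟨rfl, h3⟩
      · right; exact ⟨v2, rfl, hv2⟩

-- replace passes over a block in which no occurrence starts
theorem pvRep_skip (old new : List Char) (ho : old ≠ []) :
    ∀ a r, (∀ m, m < a.length → ¬ old <+: (a.drop m ++ r)) →
    pvRep old new (a ++ r) = a ++ pvRep old new r := by
  intro a
  induction a with
  | nil => intro r _; simp
  | cons x xs ih =>
    intro r hm
    have h0 : ¬ old <+: (x :: xs) ++ r := by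
      have := hm 0 (by simp)
      simpa using this
    rw [List.cons_append]
    rw [pvRep_cons_neg old new x (xs ++ r) (by simpa using h0)]
    rw [ih r (fun m hmm => by
      have := hm (m+1) (by simp; omega)
      simpa using this)]
    rfl

-- --- tokens, greedy parse, render ---
inductive PvTok where
  | ch : Char → PvTok
  | key : Nat → PvTok
deriving DecidableEq

def pvFindIdx (s : List Char) : Option Nat :=
  pvItems.findIdx? (fun kv => kv.1.toList.isPrefixOf s)

theorem pvFindIdx_some_spec {s : List Char} {j : Nat} (h : pvFindIdx s = some j) :
    j < 6 ∧ (pvK j).isPrefixOf s = true := by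
  unfold pvFindIdx pvItems at h
  simp only [List.findIdx?_cons, List.findIdx?_nil, Option.map_none, Option.map_some] at h
  split_ifs at h <;>
    simp_all <;> subst h <;> simp_all [pvK, pvItems]

theorem pvFindIdx_none_spec {s : List Char} (h : pvFindIdx s = none) :
    ∀ i ∈ List.range 6, (pvK i).isPrefixOf s = false := by
  unfold pvFindIdx pvItems at h
  simp only [List.findIdx?_cons, List.findIdx?_nil, Option.map_none, Option.map_some] at h
  split_ifs at h <;> simp_all
  intro i hi
  rw [Bool.eq_false_iff]
  intro hc
  rw [List.isPrefixOf_iff_prefix] at hc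
  interval_cases i <;> simp_all [pvK, pvItems]



def pvParse (s : List Char) : List PvTok :=
  match s with
  | [] => []
  | c :: t =>
    match h : pvFindIdx (c :: t) with
    | some j => .key j :: pvParse ((c :: t).drop (pvK j).length)
    | none => .ch c :: pvParse t
  termination_by s.length
  decreasing_by
  · have hs := pvFindIdx_some_spec h
    have hne := F_keys_ne j (by simp [hs.1])
    have hl : 0 < (pvK j).length := by cases hk : pvK j with
      | nil => exact absurd hk hne
      | cons x y => simp
    simp only [List.length_drop]
    simp only [List.length_cons]
    omega
  · simp

def pvRender (σ : Nat → List Char) : List PvTok → List Char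
  | [] => []
  | .ch c :: L => c :: pvRender σ L
  | .key i :: L => σ i ++ pvRender σ L

def pvSig (p i : Nat) : List Char := if i < p then pvW i else pvK i

theorem pvParse_nil : pvParse [] = [] := by rw [pvParse]
theorem pvParse_cons_some {c t j} (h : pvFindIdx (c :: t) = some j) :
    pvParse (c :: t) = .key j :: pvParse ((c :: t).drop (pvK j).length) := by
  rw [pvParse.eq_def]; simp only []; rw [h]
theorem pvParse_cons_none {c t} (h : pvFindIdx (c :: t) = none) :
    pvParse (c :: t) = .ch c :: pvParse t := by
  rw [pvParse.eq_def]; simp only []; rw [h]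

-- render with σ 0 (no key replaced) is the identity
theorem pvRender_sig0 : ∀ n s, s.length ≤ n → pvRender (pvSig 0) (pvParse s) = s := by
  intro n
  induction n with
  | zero =>
    intro s h
    have : s = [] := by cases s <;> simp_all
    subst this
    rw [pvParse_nil]; rfl
  | succ n ih =>
    intro s h
    cases s with
    | nil => rw [pvParse_nil]; rfl
    | cons c t =>
      cases hf : pvFindIdx (c :: t) with
      | some j =>
        rw [pvParse_cons_some hf]
        obtain ⟨hj6, hpre⟩ := pvFindIdx_some_spec hf
        rw [List.isPrefixOf_iff_prefix] at hpre
        obtain ⟨r, hr⟩ := hpre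
        have hd : (c :: t).drop (pvK j).length = r := by rw [← hr, List.drop_left]
        have hne : pvK j ≠ [] := F_keys_ne j (by simp [hj6])
        have hlen : r.length ≤ n := by
          have := congrArg List.length hr
          simp at this
          have : 0 < (pvK j).length := by cases hk : pvK j <;> simp_all
          simp only [List.length_cons] at h
          omega
        show pvSig 0 j ++ pvRender (pvSig 0) (pvParse ((c :: t).drop (pvK j).length)) = c :: t
        rw [hd, ih r hlen]
        simpa [pvSig] using hr
      | none =>
        rw [pvParse_cons_none hf]
        show c :: pvRender (pvSig 0) (pvParse t) = c :: t
        rw [ih t (by simp only [List.length_cons] at h; omega)]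

theorem pvNoBad_suffix {s t : List Char} (h : t <:+ s) (hn : pvNoBad s) : pvNoBad t := by
  intro b hb hi
  exact hn b hb (hi.trans h.isInfix)

-- occurrences of a short string in a partially-substituted render trace back to the
-- original, or end inside a substituted block
theorem pvTrans (p : Nat) : ∀ n Y, Y.length ≤ n → ∀ v : List Char, v.length < 22 →
    v <+: pvRender (pvSig p) (pvParse Y) →
    v <+: Y ∨ ∃ v1 v2 i, v = v1 ++ v2 ∧ v2 ≠ [] ∧ i < p ∧ i < 6 ∧ v2 <+: pvW i ∧ (v1 ++ pvK i) <+: Y := by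
  intro n
  induction n with
  | zero =>
    intro Y hY v _ hv
    have : Y = [] := by cases Y <;> simp_all
    subst this
    rw [pvParse_nil] at hv
    left
    exact hv
  | succ n ih =>
    intro Y hY v hlen hv
    cases Y with
    | nil =>
      rw [pvParse_nil] at hv
      left; exact hv
    | cons c t =>
      cases hf : pvFindIdx (c :: t) with
      | none =>
        rw [pvParse_cons_none hf] at hv
        cases v with
        | nil => left; exact List.nil_prefix
        | cons a v' =>
          have hv' := List.cons_prefix_cons.mp hv
          obtain ⟨rfl, hv2⟩ := hv'
          rcases ih t (by simp only [List.length_cons] at hY; omega) v'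
              (by simp only [List.length_cons] at hlen; omega) hv2 with h1 | ⟨v1, v2, i, rfl, hne, hip, hi6, hw, hk⟩
          · left; exact List.cons_prefix_cons.mpr ⟨rfl, h1⟩
          · right
            refine ⟨a :: v1, v2, i, rfl, hne, hip, hi6, hw, ?_⟩
            exact List.cons_prefix_cons.mpr ⟨rfl, hk⟩
      | some j =>
        obtain ⟨hj6, hpre⟩ := pvFindIdx_some_spec hf
        rw [List.isPrefixOf_iff_prefix] at hpre
        obtain ⟨r, hr⟩ := hpre
        have hd : (c :: t).drop (pvK j).length = r := by rw [← hr, List.drop_left]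
        rw [pvParse_cons_some hf, hd] at hv
        have hne : pvK j ≠ [] := F_keys_ne j (by simp [hj6])
        have hkl : 0 < (pvK j).length := by cases hk : pvK j <;> simp_all
        have hrl : r.length ≤ n := by
          have := congrArg List.length hr
          simp only [List.length_append, List.length_cons] at this hY
          omega
        by_cases hjp : j < p
        · have hsig : pvSig p j = pvW j := by simp [pvSig, hjp]
          rw [show pvRender (pvSig p) (PvTok.key j :: pvParse r) =
                pvSig p j ++ pvRender (pvSig p) (pvParse r) from rfl, hsig] at hv
          rcases pv_prefix_append_cases hv with h1 | ⟨v2, rfl, hv2⟩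
          · cases hv0 : v with
            | nil => left; exact List.nil_prefix
            | cons a v' =>
              right
              refine ⟨[], a :: v', j, by simp, by simp, hjp, hj6, hv0 ▸ h1, ?_⟩
              rw [List.nil_append, ← hr]
              exact List.prefix_append _ _
          · exfalso
            have := F_wlen j (by simp [hj6])
            simp only [List.length_append] at hlen
            omega
        · have hsig : pvSig p j = pvK j := by simp [pvSig, hjp]
          rw [show pvRender (pvSig p) (PvTok.key j :: pvParse r) =
                pvSig p j ++ pvRender (pvSig p) (pvParse r) from rfl, hsig] at hv
          rcases pv_prefix_append_cases hv with h1 | ⟨v', rfl, hv2⟩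
          · left
            exact h1.trans ⟨r, hr⟩
          · have hvl : v'.length < 22 := by
              simp only [List.length_append] at hlen; omega
            rcases ih r hrl v' hvl hv2 with h1 | ⟨v1, v2, i, rfl, hne2, hip, hi6, hw, hk⟩
            · left
              obtain ⟨q, rfl⟩ := h1
              rw [← hr]
              exact ⟨q, by simp⟩
            · right
              refine ⟨pvK j ++ v1, v2, i, by simp, hne2, hip, hi6, hw, ?_⟩
              obtain ⟨q, rfl⟩ := hk
              rw [← hr]
              exact ⟨q, by simp⟩

-- the main per-pass theorem: pass p turns the p-mixed render into the (p+1)-mixed render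
theorem pvPass (p : Nat) (hp : p < 6) : ∀ n Y, Y.length ≤ n → pvNoBad Y →
    pvRep (pvK p) (pvW p) (pvRender (pvSig p) (pvParse Y)) = pvRender (pvSig (p+1)) (pvParse Y) := by
  have hpne : pvK p ≠ [] := F_keys_ne p (by simp [hp])
  have hpmem : p ∈ List.range 6 := by simp [hp]
  intro n
  induction n with
  | zero =>
    intro Y hY _
    have : Y = [] := by cases Y <;> simp_all
    subst this
    rw [pvParse_nil]
    show pvRep (pvK p) (pvW p) [] = []
    exact pvRep_nil _ _
  | succ n ih =>
    intro Y hY hnb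
    cases Y with
    | nil =>
      rw [pvParse_nil]
      exact pvRep_nil _ _
    | cons c t =>
      cases hf : pvFindIdx (c :: t) with
      | none =>
        rw [pvParse_cons_none hf]
        have hnbt : pvNoBad t := pvNoBad_suffix (List.suffix_cons c t) hnb
        have htl : t.length ≤ n := by simp only [List.length_cons] at hY; omega
        show pvRep (pvK p) (pvW p) (c :: pvRender (pvSig p) (pvParse t)) =
          c :: pvRender (pvSig (p+1)) (pvParse t)
        have hnp : ¬ pvK p <+: c :: pvRender (pvSig p) (pvParse t) := by
          intro hcp
          cases hK : pvK p with
          | nil => exact hpne hK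
          | cons k0 Kp' =>
            rw [hK] at hcp
            obtain ⟨rfl, hKp'⟩ := List.cons_prefix_cons.mp hcp
            have hkl : (pvK p).length ≤ 12 := F_klen p hpmem
            have hKp'len : Kp'.length < 22 := by
              have := congrArg List.length hK
              simp at this; omega
            rcases pvTrans p n t htl Kp' hKp'len hKp' with h1 | ⟨v1, v2, i, heq, hne2, hip, hi6, hw, hk⟩
            · have := pvFindIdx_none_spec hf p hpmem
              rw [Bool.eq_false_iff] at this
              apply this
              rw [List.isPrefixOf_iff_prefix, hK]
              exact List.cons_prefix_cons.mpr ⟨rfl, h1⟩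
            · have himem : i ∈ List.range 6 := by simp [hi6]
              have hdrop : (pvK p).drop (v1.length + 1) = v2 := by
                rw [hK, heq]
                show (v1 ++ v2).drop v1.length = v2
                exact List.drop_left ..
              have htake : (pvK p).take (v1.length + 1) = k0 :: v1 := by
                rw [hK, heq]
                show k0 :: (v1 ++ v2).take v1.length = k0 :: v1
                rw [List.take_left]
              have hlenp : (pvK p).length = v1.length + v2.length + 1 := by
                rw [hK, heq]; simp; try omega
              have hv2pos : 0 < v2.length := by cases v2 <;> simp_all
              have hcr := F_cross p hpmem i himem hip (v1.length + 1)
                (by simp; omega) (by omega) (by omega)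
                (by rw [hdrop, List.isPrefixOf_iff_prefix]; exact hw)
              have hbadmem : ((pvK p).take (v1.length + 1) ++ pvK i) ∈ pvBadL := by
                simpa using hcr
              rw [htake] at hbadmem
              apply hnb _ hbadmem
              have : (k0 :: v1) ++ pvK i <+: k0 :: t := List.cons_prefix_cons.mpr ⟨rfl, hk⟩
              exact this.isInfix
        rw [pvRep_cons_neg _ _ _ _ hnp, ih t htl hnbt]
      | some j =>
        obtain ⟨hj6, hpre⟩ := pvFindIdx_some_spec hf
        rw [List.isPrefixOf_iff_prefix] at hpre
        obtain ⟨r, hr⟩ := hpre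
        have hjmem : j ∈ List.range 6 := by simp [hj6]
        have hd : (c :: t).drop (pvK j).length = r := by rw [← hr, List.drop_left]
        rw [pvParse_cons_some hf, hd]
        have hjne : pvK j ≠ [] := F_keys_ne j hjmem
        have hkl : 0 < (pvK j).length := by cases hk : pvK j <;> simp_all
        have hrl : r.length ≤ n := by
          have := congrArg List.length hr
          simp only [List.length_append, List.length_cons] at this hY
          omega
        have hnbr : pvNoBad r := by
          apply pvNoBad_suffix _ hnb
          rw [← hd]
          exact List.drop_suffix ..
        have hih := ih r hrl hnbr
        by_cases hjp : j = p
        · have hsig : pvSig p j = pvK p := by simp [pvSig, hjp]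
          have hsig' : pvSig (p+1) j = pvW p := by simp [pvSig, hjp]
          show pvRep (pvK p) (pvW p) (pvSig p j ++ pvRender (pvSig p) (pvParse r)) =
            pvSig (p+1) j ++ pvRender (pvSig (p+1)) (pvParse r)
          rw [hsig, pvRep_consume _ _ _ hpne, hih, hsig']
        · have hsig_eq : pvSig (p+1) j = pvSig p j := by
            simp only [pvSig]
            rcases Nat.lt_trichotomy j p with h1 | h1 | h1
            · simp [h1, Nat.lt_succ_of_lt h1]
            · exact absurd h1 hjp
            · have h2 : ¬ j < p := by omega
              have h3 : ¬ j < p + 1 := by omega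
              simp [h2, h3]
          show pvRep (pvK p) (pvW p) (pvSig p j ++ pvRender (pvSig p) (pvParse r)) =
            pvSig (p+1) j ++ pvRender (pvSig (p+1)) (pvParse r)
          rw [hsig_eq, ← hih]
          apply pvRep_skip _ _ hpne
          -- no occurrence of key p starts inside the segment pvSig p j
          intro m hm hocc
          set R := pvRender (pvSig p) (pvParse r) with hR
          by_cases hjlt : j < p
          · -- segment is pvW j: barred
            have hsig : pvSig p j = pvW j := by simp [pvSig, hjlt]
            rw [hsig] at hocc hm
            have hbar := F_bar j hjmem p hpmem m (by
              have := F_wlen_up j hjmem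
              simp only [List.mem_range]
              omega) hm
            rcases pv_prefix_append_cases hocc with h1 | ⟨v2, heq, _⟩
            · rw [← List.isPrefixOf_iff_prefix] at h1
              rw [hbar.1] at h1
              exact Bool.false_ne_true h1
            · have : (pvW j).drop m <+: pvK p := ⟨v2, heq.symm⟩
              rw [← List.isPrefixOf_iff_prefix] at this
              rw [hbar.2] at this
              exact Bool.false_ne_true this
          · -- segment is pvK j with j ≠ p
            have hsig : pvSig p j = pvK j := by simp [pvSig, hjlt]
            rw [hsig] at hocc hm
            have hkl12 : (pvK j).length ≤ 12 := F_klen j hjmem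
            rcases pv_prefix_append_cases hocc with h1 | ⟨v', heq, hv'⟩
            · -- occurrence inside pvK j: impossible
              rw [← List.isPrefixOf_iff_prefix] at h1
              rw [F_no_inf p hpmem j hjmem (fun hc => hjp hc.symm) m (by
                have := F_klen j hjmem
                simp only [List.mem_range]
                omega)] at h1
              exact Bool.false_ne_true h1
            · -- occurrence starts inside pvK j and continues into R
              cases hm0 : m with
              | zero =>
                subst hm0
                simp only [List.drop_zero] at heq
                have : pvK j <+: pvK p := ⟨v', heq.symm⟩
                rw [← List.isPrefixOf_iff_prefix] at this
                rw [F_no_pref j hjmem p hpmem hjp] at this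
                exact Bool.false_ne_true this
              | succ m0 =>
                have hmpos : 0 < m := by omega
                have hdm : ((pvK j).drop m).isPrefixOf (pvK p) = true := by
                  rw [List.isPrefixOf_iff_prefix]
                  exact ⟨v', heq.symm⟩
                have hhard := F_hard p hpmem j hjmem (fun hc => hjp (hc.symm)) m
                  (by
                    have := F_klen j hjmem
                    simp only [List.mem_range]
                    omega) hmpos hm hdm
                obtain ⟨hvne, hbad, hnspw⟩ := hhard
                have hvdef : (pvK p).drop ((pvK j).length - m) = v' := by
                  have hld : ((pvK j).drop m).length = (pvK j).length - m := by
                    simp [List.length_drop]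
                  rw [heq, ← hld, List.drop_left]
                rw [hvdef] at hvne hbad hnspw
                have hkp12 : (pvK p).length ≤ 12 := F_klen p hpmem
                have hlv' : v'.length ≤ 12 := by
                  have := congrArg List.length heq
                  simp only [List.length_append, List.length_drop] at this
                  omega
                have hvlen : v'.length < 22 := by omega
                rcases pvTrans p n r hrl v' hvlen hv' with h1 | ⟨v1, v2, i, heq2, hne2, hip, hi6, hw, hk⟩
                · -- the occurrence was already in r: it makes a bad string an infix of Y
                  apply hnb _ (by simpa using hbad)
                  have : pvK j ++ v' <+: pvK j ++ r := by
                    obtain ⟨q, rfl⟩ := h1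
                    exact ⟨q, by simp⟩
                  rw [hr] at this
                  exact this.isInfix
                · -- the occurrence would end inside a substituted block: refuted by F_hard
                  have himem : i ∈ List.range 6 := by simp [hi6]
                  have hnsp := hnspw v1.length (by
                    have := congrArg List.length heq2
                    simp only [List.length_append] at this
                    simp only [List.mem_range]
                    omega) i himem
                  have hd2 : v'.drop v1.length = v2 := by
                    rw [heq2]; exact List.drop_left ..
                  rw [hd2] at hnsp
                  have hfalse := hnsp hne2
                  rw [← List.isPrefixOf_iff_prefix, hfalse] at hw
                  exact Bool.false_ne_true hw

-- a key token makes its key an infix of the render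
theorem pvKey_infix (p : Nat) : ∀ L : List PvTok, .key p ∈ L → pvK p <:+: pvRender (pvSig p) L := by
  intro L
  induction L with
  | nil => intro h; simp at h
  | cons tok L ih =>
    intro h
    cases tok with
    | ch c =>
      have : PvTok.key p ∈ L := by simpa using h
      exact ((ih this).trans (List.suffix_cons c _).isInfix)
    | key i =>
      by_cases hip : i = p
      · show pvK p <:+: pvSig p i ++ pvRender (pvSig p) L
        rw [hip]
        have hs : pvSig p p = pvK p := by simp [pvSig]
        rw [hs]
        exact ⟨[], pvRender (pvSig p) L, rfl⟩
      · have : PvTok.key p ∈ L := by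
          rcases List.mem_cons.mp h with h1 | h1
          · cases h1; exact absurd rfl hip
          · exact h1
        exact ((ih this).trans (List.suffix_append (pvSig p i) _).isInfix)

theorem pvRender_sig_succ (p : Nat) : ∀ L : List PvTok, .key p ∉ L →
    pvRender (pvSig p) L = pvRender (pvSig (p+1)) L := by
  intro L
  induction L with
  | nil => intro _; rfl
  | cons tok L ih =>
    intro h
    cases tok with
    | ch c =>
      show c :: pvRender (pvSig p) L = c :: pvRender (pvSig (p+1)) L
      rw [ih (fun hc => h (List.mem_cons_of_mem _ hc))]
    | key i =>
      have hip : i ≠ p := fun hc => h (by rw [hc]; exact List.mem_cons_self)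
      show pvSig p i ++ pvRender (pvSig p) L = pvSig (p+1) i ++ pvRender (pvSig (p+1)) L
      have : pvSig p i = pvSig (p+1) i := by
        simp only [pvSig]
        rcases Nat.lt_trichotomy i p with h1 | h1 | h1
        · simp [h1, Nat.lt_succ_of_lt h1]
        · exact absurd h1 hip
        · have h2 : ¬ i < p := by omega
          have h3 : ¬ i < p + 1 := by omega
          simp [h2, h3]
      rw [this, ih (fun hc => h (List.mem_cons_of_mem _ hc))]

-- pushing lower through pvRep
theorem pvRep_lower (old new : List Char) (ho : old ≠ []) :
    ∀ n s, s.length ≤ n → List.map PySem.Chars.lowerChar s = s →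
    List.map PySem.Chars.lowerChar old = old →
    List.map PySem.Chars.lowerChar (pvRep old new s) = pvRep old (List.map PySem.Chars.lowerChar new) s := by
  intro n
  induction n with
  | zero =>
    intro s h _ _
    have : s = [] := by cases s <;> simp_all
    subst this
    rw [pvRep_nil, pvRep_nil]; rfl
  | succ n ih =>
    intro s h hfix hold
    by_cases hp : old <+: s
    · obtain ⟨r, rfl⟩ := hp
      have hrfix : List.map PySem.Chars.lowerChar r = r := by
        rw [List.map_append, hold] at hfix
        exact List.append_cancel_left hfix
      have hol : 0 < old.length := by cases old <;> simp_all
      have hrl : r.length ≤ n := by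
        rw [List.length_append] at h; omega
      rw [pvRep_consume _ _ _ ho, pvRep_consume _ _ _ ho]
      rw [List.map_append]
      rw [ih r hrl hrfix hold]
    · cases s with
      | nil => rw [pvRep_nil, pvRep_nil]; rfl
      | cons c t =>
        rw [pvRep_cons_neg _ _ _ _ hp, pvRep_cons_neg _ _ _ _ hp]
        have hc : PySem.Chars.lowerChar c = c := by
          simp only [List.map_cons, List.cons.injEq] at hfix
          exact hfix.1
        have ht : List.map PySem.Chars.lowerChar t = t := by
          simp only [List.map_cons, List.cons.injEq] at hfix
          exact hfix.2
        simp only [List.map_cons, hc]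
        rw [ih t (by simp only [List.length_cons] at h; omega) ht hold]

-- --- the A side: the foldl tracks the mixed renders ---
theorem pvA_inv (lt : List Char) (hfix : List.map PySem.Chars.lowerChar lt = lt) (hnb : pvNoBad lt) :
    ∀ p, p ≤ 6 → ∀ scr : String,
    List.map PySem.Chars.lowerChar scr.toList = pvRender (pvSig p) (pvParse lt) →
    List.map PySem.Chars.lowerChar ((List.foldl (fun scrubbed kv =>
      if PySem.Str.isIn kv.1 (PySem.Str.lower scrubbed) = true then
        PySem.Str.replace (PySem.Str.lower scrubbed) kv.1 (kv.2 ++ " style")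
      else scrubbed) scr (pvItems.drop p)).toList) = pvRender (pvSig 6) (pvParse lt) := by
  suffices H : ∀ k p, p + k = 6 → ∀ scr : String,
      List.map PySem.Chars.lowerChar scr.toList = pvRender (pvSig p) (pvParse lt) →
      List.map PySem.Chars.lowerChar ((List.foldl (fun scrubbed kv =>
        if PySem.Str.isIn kv.1 (PySem.Str.lower scrubbed) = true then
          PySem.Str.replace (PySem.Str.lower scrubbed) kv.1 (kv.2 ++ " style")
        else scrubbed) scr (pvItems.drop p)).toList) = pvRender (pvSig 6) (pvParse lt) by
    intro p hp scr hscr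
    exact H (6 - p) p (by omega) scr hscr
  intro k
  induction k with
  | zero =>
    intro p hp scr hscr
    have hp6 : p = 6 := by omega
    subst hp6
    have hd : pvItems.drop 6 = [] := rfl
    rw [hd]
    simpa using hscr
  | succ k ihk =>
    intro p hp scr hscr
    have hp6 : p < 6 := by omega
    have hlen : p < pvItems.length := by
      have : pvItems.length = 6 := rfl
      omega
    rw [List.drop_eq_getElem_cons hlen, List.foldl_cons]
    have hgetD : pvItems.getD p ("","") = pvItems[p] := List.getD_eq_getElem pvItems ("","") hlen
    have hkK : (pvItems[p]).1.toList = pvK p := by rw [pvK, hgetD]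
    have hwW : List.map PySem.Chars.lowerChar ((pvItems[p]).2 ++ " style").toList = pvW p := by
      rw [pvW, pvWm, hgetD]
    have hpne : pvK p ≠ [] := F_keys_ne p (by simp [hp6])
    have hlow : (PySem.Str.lower scr).toList = List.map PySem.Chars.lowerChar scr.toList := by
      rw [PySem.Str.toList_lower]; rfl
    by_cases hc : PySem.Str.isIn (pvItems[p]).1 (PySem.Str.lower scr) = true
    · rw [if_pos hc]
      apply ihk (p+1) (by omega)
      rw [PySem.Str.toList_replace, hlow, hkK]
      rw [pv_replace_eq_pvRep _ _ _ hpne]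
      have hfix2 : List.map PySem.Chars.lowerChar (List.map PySem.Chars.lowerChar scr.toList) =
          List.map PySem.Chars.lowerChar scr.toList := pv_map_lower_idem _
      rw [pvRep_lower (pvK p) ((pvItems[p]).2 ++ " style").toList hpne
        (List.map PySem.Chars.lowerChar scr.toList).length _ le_rfl hfix2
        (F_k_lower p (by simp [hp6]))]
      rw [hwW, hscr]
      exact pvPass p hp6 lt.length lt le_rfl hnb
    · rw [if_neg hc]
      apply ihk (p+1) (by omega)
      rw [hscr]
      have hnotin : ¬ pvK p <:+: pvRender (pvSig p) (pvParse lt) := by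
        intro hin
        apply hc
        rw [PySem.Str.isIn, hlow, hkK, hscr]
        rw [PySem.Chars.isIn, bne_iff_ne]
        rw [ne_eq, PySem.Chars.find_eq_neg_one_iff]
        simpa using hin
      have hnokey : PvTok.key p ∉ pvParse lt := fun hmem => hnotin (pvKey_infix p _ hmem)
      exact pvRender_sig_succ p _ hnokey

-- find? in terms of findIdx?
theorem pv_find?_eq {α : Type} (p : α → Bool) (d : α) : ∀ l : List α,
    l.find? p = (l.findIdx? p).map (fun i => l.getD i d) := by
  intro l
  induction l with
  | nil => rfl
  | cons x xs ih =>
    rw [List.find?_cons, List.findIdx?_cons]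
    by_cases h : p x
    · simp [h]
    · simp only [Bool.not_eq_true] at h
      cases hfi : xs.findIdx? p <;> simp [h, hfi, ih]

theorem pvBGo_nil : pvBGo [] = [] := by rw [pvBGo]
theorem pvBGo_cons_some {c t kv} (h : pvItems.find? (fun kv => kv.1.toList.isPrefixOf (c :: t)) = some kv) :
    pvBGo (c :: t) = (kv.2 ++ " style").toList ++ pvBGo ((c :: t).drop kv.1.toList.length) := by
  rw [pvBGo.eq_def]; simp only []; rw [h]
theorem pvBGo_cons_none {c t} (h : pvItems.find? (fun kv => kv.1.toList.isPrefixOf (c :: t)) = none) :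
    pvBGo (c :: t) = c :: pvBGo t := by
  rw [pvBGo.eq_def]; simp only []; rw [h]

-- --- the B side: the scan is the fully-substituted render ---
theorem pvB_main : ∀ n s, s.length ≤ n → List.map PySem.Chars.lowerChar s = s →
    List.map PySem.Chars.lowerChar (pvBGo s) = pvRender (pvSig 6) (pvParse s) := by
  intro n
  induction n with
  | zero =>
    intro s h _
    have : s = [] := by cases s <;> simp_all
    subst this
    rw [pvBGo_nil, pvParse_nil]
    rfl
  | succ n ih =>
    intro s h hfix
    cases s with
    | nil => rw [pvBGo_nil, pvParse_nil]; rfl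
    | cons c t =>
      have hfind := pv_find?_eq (fun kv => kv.1.toList.isPrefixOf (c :: t)) ("","") pvItems
      cases hf : pvFindIdx (c :: t) with
      | some j =>
        obtain ⟨hj6, hpre⟩ := pvFindIdx_some_spec hf
        rw [pvFindIdx] at hf
        rw [hf] at hfind
        simp only [Option.map_some] at hfind
        rw [pvBGo_cons_some hfind, pvParse_cons_some (by rw [pvFindIdx]; exact hf)]
        have hk : (pvItems.getD j ("","")).1.toList = pvK j := rfl
        have hw : List.map PySem.Chars.lowerChar ((pvItems.getD j ("","")).2 ++ " style").toList = pvW j := rfl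
        show List.map PySem.Chars.lowerChar (((pvItems.getD j ("","")).2 ++ " style").toList ++
          pvBGo ((c :: t).drop (pvItems.getD j ("","")).1.toList.length)) = _
        rw [List.map_append, hw, hk]
        have hne : pvK j ≠ [] := F_keys_ne j (by simp [hj6])
        have hkl : 0 < (pvK j).length := by cases hh : pvK j <;> simp_all
        rw [ih ((c :: t).drop (pvK j).length)
          (by simp only [List.length_drop, List.length_cons] at h ⊢; omega)
          (by rw [List.map_drop, hfix])]
        have hsig : pvSig 6 j = pvW j := by simp [pvSig, hj6]
        show pvW j ++ _ = pvSig 6 j ++ _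
        rw [hsig]
      | none =>
        rw [pvFindIdx] at hf
        rw [hf] at hfind
        simp only [Option.map_none] at hfind
        rw [pvBGo_cons_none hfind, pvParse_cons_none (by rw [pvFindIdx]; exact hf)]
        show List.map PySem.Chars.lowerChar (c :: pvBGo t) = _
        simp only [List.map_cons]
        have hc : PySem.Chars.lowerChar c = c := by
          simp only [List.map_cons, List.cons.injEq] at hfix
          exact hfix.1
        have ht : List.map PySem.Chars.lowerChar t = t := by
          simp only [List.map_cons, List.cons.injEq] at hfix
          exact hfix.2
        rw [ih t (by simp only [List.length_cons] at h; omega) ht, hc]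
        rfl

-- ===== VERDICT (by name: the statement is the Claim_ definition above) =====
theorem scrub_ip_risks_py_spec : Claim_equal_scrub_ip_risks_py := by
  intro topic _hdom hpre
  unfold Spec_scrub_ip_risks_py scrub_ip_risks_py scrub_ip_risks_py_alt
  obtain ⟨h1, h2, h3⟩ := hpre
  set lt := (PySem.Str.lower topic).toList with hlt
  have hlow : lt = List.map PySem.Chars.lowerChar topic.toList := by
    rw [hlt, PySem.Str.toList_lower]; rfl
  have hfix : List.map PySem.Chars.lowerChar lt = lt := by
    rw [hlow]; exact pv_map_lower_idem _
  have conv : ∀ bs : String, PySem.Str.isIn bs (PySem.Str.lower topic) = false → ¬ bs.toList <:+: lt := by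
    intro bs hbs
    rw [PySem.Str.isIn_eq] at hbs
    exact (PySem.Chars.isIn_eq_false_iff _ _).mp hbs
  have hnb : pvNoBad lt := by
    intro b hb
    simp only [pvBadL, List.mem_cons, List.not_mem_nil, or_false] at hb
    rcases hb with rfl | rfl | rfl
    · exact conv "narutone piece" h1
    · exact conv "pokemone piece" h2
    · exact conv "pokemonaruto" h3
  have hbase : List.map PySem.Chars.lowerChar topic.toList = pvRender (pvSig 0) (pvParse lt) := by
    rw [pvRender_sig0 lt.length lt le_rfl]
    exact hlow.symm
  have hA := pvA_inv lt hfix hnb 0 (by omega) topic hbase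
  rw [List.drop_zero] at hA
  have hB := pvB_main lt.length lt le_rfl hfix
  show String.ofList (pvTitleGo false (List.foldl _ topic pvItems).toList) =
    String.ofList (pvTitleGo false (pvBGo lt))
  apply congrArg
  calc pvTitleGo false (List.foldl _ topic pvItems).toList
      = pvTitleGo false (List.map PySem.Chars.lowerChar (List.foldl _ topic pvItems).toList) :=
        (pvTitleGo_lower _ _).symm
    _ = pvTitleGo false (pvRender (pvSig 6) (pvParse lt)) := by rw [hA]
    _ = pvTitleGo false (List.map PySem.Chars.lowerChar (pvBGo lt)) := by rw [hB]
    _ = pvTitleGo false (pvBGo lt) := pvTitleGo_lower _ _
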